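-- pv_equiv track=rewrite | github.com/kvcache-ai/Mooncake | scripts/check_snapshot_serialization.py | select_compile_args
-- ===== SOURCE A (Python) =====
-- def select_compile_args(
--     header_abs_path: str, compile_commands: dict[str, list[str]]
-- ) -> list[str]:
--     if header_abs_path in compile_commands:
--         return compile_commands[header_abs_path]
--
--     preferred_suffixes = [
--         "mooncake-store/src/serialize/serializer.cpp",
--         "mooncake-store/src/master_service.cpp",
--         "mooncake-store/src/segment.cpp",
--         "mooncake-store/src/task_manager.cpp",
--     ]
--     for suffix in preferred_suffixes:
--         for file_path, args in compile_commands.items():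
--             if file_path.endswith(suffix):
--                 return args
--
--     for file_path, args in compile_commands.items():
--         if "/mooncake-store/src/" in file_path:
--             return args
--
--     for _, args in compile_commands.items():
--         return args
--
--     return []
-- ===== SOURCE B (Python) =====
-- _PREFERRED_SUFFIXES = (
--     "mooncake-store/src/serialize/serializer.cpp",
--     "mooncake-store/src/master_service.cpp",
--     "mooncake-store/src/segment.cpp",
--     "mooncake-store/src/task_manager.cpp",
-- )
--
--
-- def _rank(file_path):
--     for i, suffix in enumerate(_PREFERRED_SUFFIXES):
--         if file_path.endswith(suffix):
--             return i
--     return 4 if "/mooncake-store/src/" in file_path else 5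
--
--
-- def select_compile_args(header_abs_path, compile_commands):
--     if header_abs_path in compile_commands:
--         return compile_commands[header_abs_path]
--
--     best_rank = 6
--     best_args = []
--     for file_path, args in compile_commands.items():
--         r = _rank(file_path)
--         if r < best_rank:
--             best_rank, best_args = r, args
--     return best_args
-- ===== Notes on version B (the rewrite author's own statement) =====
-- stated objective: alternative
-- what changed: A's four suffix-priority full scans plus substring and first-entry fallback scans (up to six passes over the dict) are replaced by a single pass that assigns each entry a priority rank (suffix index, substring, any) and tracks the first entry of minimal rank.
import Mathlib
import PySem

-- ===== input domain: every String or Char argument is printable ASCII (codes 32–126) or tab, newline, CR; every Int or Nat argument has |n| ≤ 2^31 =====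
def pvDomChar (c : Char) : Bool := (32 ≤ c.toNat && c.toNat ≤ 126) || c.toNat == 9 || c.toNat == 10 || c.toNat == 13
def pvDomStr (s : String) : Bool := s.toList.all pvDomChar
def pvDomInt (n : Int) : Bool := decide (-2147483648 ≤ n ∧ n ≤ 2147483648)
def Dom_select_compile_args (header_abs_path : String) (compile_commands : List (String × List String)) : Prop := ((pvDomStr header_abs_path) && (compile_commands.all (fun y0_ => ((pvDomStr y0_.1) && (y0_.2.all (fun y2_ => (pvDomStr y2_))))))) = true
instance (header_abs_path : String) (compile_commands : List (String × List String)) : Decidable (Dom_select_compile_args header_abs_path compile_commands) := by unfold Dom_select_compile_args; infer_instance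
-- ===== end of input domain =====

-- B replaces A's four-plus-two sequential full scans of the dict by ONE pass that tracks
-- the entry of minimal priority rank (objective: alternative decomposition, same result).

-- ===== PORT A =====
-- a 'for file_path, args in …: if p(file_path): return args' loop
def pvFirst (p : String → Bool) : List (String × List String) → Option (List String)
  | [] => none
  | (fp, args) :: rest => if p fp then some args else pvFirst p rest

def pvSuffixes : List String :=
  ["mooncake-store/src/serialize/serializer.cpp",
   "mooncake-store/src/master_service.cpp",
   "mooncake-store/src/segment.cpp",
   "mooncake-store/src/task_manager.cpp"]

-- 'for suffix in preferred_suffixes: for file_path, args in …: if file_path.endswith(suffix): return args'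
def pvScanSuffixes : List String → List (String × List String) → Option (List String)
  | [], _ => none
  | s :: rest, cc =>
    match pvFirst (fun fp => PySem.Str.endswith fp s) cc with
    | some a => some a
    | none => pvScanSuffixes rest cc

def select_compile_args (header_abs_path : String) (compile_commands : List (String × List String)) : List String :=
  if PySem.Dict.contains (PySem.Dict.mk compile_commands) header_abs_path then
    PySem.Dict.getD (PySem.Dict.mk compile_commands) header_abs_path []
  else
    match pvScanSuffixes pvSuffixes compile_commands with
    | some a => a
    | none =>
      match pvFirst (fun fp => PySem.Str.isIn "/mooncake-store/src/" fp) compile_commands with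
      | some a => a
      | none =>
        match pvFirst (fun _ => true) compile_commands with
        | some a => a
        | none => []

-- ===== PORT B =====
-- 'for i, suffix in enumerate(_PREFERRED_SUFFIXES): if file_path.endswith(suffix): return i'
def pvRankGo (i : Nat) : List String → String → Option Nat
  | [], _ => none
  | s :: rest, fp => if PySem.Str.endswith fp s then some i else pvRankGo (i + 1) rest fp

def pvRank (fp : String) : Nat :=
  match pvRankGo 0 pvSuffixes fp with
  | some i => i
  | none => if PySem.Str.isIn "/mooncake-store/src/" fp then 4 else 5

-- the single min-tracking pass
def pvBestLoop : List (String × List String) → Nat → List String → List String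
  | [], _, bestArgs => bestArgs
  | (fp, args) :: rest, bestRank, bestArgs =>
    let r := pvRank fp
    if r < bestRank then pvBestLoop rest r args else pvBestLoop rest bestRank bestArgs

def select_compile_args_alt (header_abs_path : String) (compile_commands : List (String × List String)) : List String :=
  if PySem.Dict.contains (PySem.Dict.mk compile_commands) header_abs_path then
    PySem.Dict.getD (PySem.Dict.mk compile_commands) header_abs_path []
  else
    pvBestLoop compile_commands 6 []

-- ===== PRECONDITION & SPEC =====
def Spec_select_compile_args (header_abs_path : String) (compile_commands : List (String × List String)) (out : List String) : Prop := out = select_compile_args_alt header_abs_path compile_commands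
instance (header_abs_path : String) (compile_commands : List (String × List String)) (out : List String) : Decidable (Spec_select_compile_args header_abs_path compile_commands out) := by unfold Spec_select_compile_args; infer_instance

-- ===== CLAIM (what is proved, stated in full; the proofs are below) =====
def Claim_equal_select_compile_args : Prop := ∀ (header_abs_path : String) (compile_commands : List (String × List String)), Dom_select_compile_args header_abs_path compile_commands → Spec_select_compile_args header_abs_path compile_commands (select_compile_args header_abs_path compile_commands)

-- ===== LEMMAS AND PROOFS =====

-- proof-side: first entry of minimal rank (head wins ties), recursively
def pvMin : List (String × List String) → Option (Nat × List String)
  | [] => none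
  | (fp, args) :: rest =>
    match pvMin rest with
    | none => some (pvRank fp, args)
    | some (r', a') => if r' < pvRank fp then some (r', a') else some (pvRank fp, args)

theorem pvRank_eq (fp : String) :
    pvRank fp =
      (if PySem.Str.endswith fp "mooncake-store/src/serialize/serializer.cpp" then 0
       else if PySem.Str.endswith fp "mooncake-store/src/master_service.cpp" then 1
       else if PySem.Str.endswith fp "mooncake-store/src/segment.cpp" then 2
       else if PySem.Str.endswith fp "mooncake-store/src/task_manager.cpp" then 3
       else if PySem.Str.isIn "/mooncake-store/src/" fp then 4 else 5) := by
  simp only [pvRank, pvSuffixes, pvRankGo]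
  split_ifs <;> rfl

theorem pvRank_le (fp : String) : pvRank fp ≤ 5 := by
  rw [pvRank_eq]; split_ifs <;> omega

theorem pvFirst_eq_none (p : String → Bool) (cc : List (String × List String)) :
    pvFirst p cc = none ↔ ∀ e ∈ cc, p e.1 = false := by
  induction cc with
  | nil => simp [pvFirst]
  | cons e rest ih =>
    obtain ⟨fp, args⟩ := e
    by_cases h : p fp <;> simp [pvFirst, h, ih]

theorem pvFirst_congr (p q : String → Bool) (cc : List (String × List String))
    (h : ∀ e ∈ cc, p e.1 = q e.1) : pvFirst p cc = pvFirst q cc := by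
  induction cc with
  | nil => rfl
  | cons e rest ih =>
    obtain ⟨fp, args⟩ := e
    simp only [pvFirst, h (fp, args) (by simp)]
    exact if_congr Iff.rfl rfl (ih fun e he => h e (List.mem_cons_of_mem _ he))

theorem pvMin_rank_ge (cc : List (String × List String)) (i : Nat)
    (hlo : ∀ e ∈ cc, i ≤ pvRank e.1) :
    ∀ r' a', pvMin cc = some (r', a') → i ≤ r' := by
  induction cc with
  | nil => simp [pvMin]
  | cons e rest ih =>
    obtain ⟨fp, args⟩ := e
    intro r' a' h
    have hfp : i ≤ pvRank fp := hlo (fp, args) (by simp)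
    have hrest : ∀ e ∈ rest, i ≤ pvRank e.1 := fun e he => hlo e (List.mem_cons_of_mem _ he)
    simp only [pvMin] at h
    rcases hm : pvMin rest with _ | ⟨r'', a''⟩ <;> rw [hm] at h <;> dsimp only at h
    · simp at h; omega
    · have := ih hrest r'' a'' hm
      split_ifs at h <;> (simp at h; omega)

theorem pvMin_of_first (cc : List (String × List String)) (i : Nat)
    (hlo : ∀ e ∈ cc, i ≤ pvRank e.1) (a : List String)
    (hf : pvFirst (fun fp => pvRank fp == i) cc = some a) :
    pvMin cc = some (i, a) := by
  induction cc with
  | nil => simp [pvFirst] at hf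
  | cons e rest ih =>
    obtain ⟨fp, args⟩ := e
    have hrest : ∀ e ∈ rest, i ≤ pvRank e.1 := fun e he => hlo e (List.mem_cons_of_mem _ he)
    simp only [pvFirst] at hf
    by_cases hfp : pvRank fp = i
    · simp [hfp] at hf
      subst hf
      simp only [pvMin]
      rcases hm : pvMin rest with _ | ⟨r'', a''⟩
      · simp [hfp]
      · have := pvMin_rank_ge rest i hrest r'' a'' hm
        rw [hfp]; simp [Nat.not_lt.mpr this]
    · simp [hfp] at hf
      have hmr := ih hrest hf
      simp only [pvMin, hmr]
      have : i < pvRank fp := lt_of_le_of_ne (hlo (fp, args) (by simp)) (Ne.symm hfp)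
      simp [this]

theorem pvBestLoop_eq (cc : List (String × List String)) :
    ∀ r a, pvBestLoop cc r a =
      match pvMin cc with
      | none => a
      | some (r', a') => if r' < r then a' else a := by
  induction cc with
  | nil => intro r a; rfl
  | cons e rest ih =>
    obtain ⟨fp, args⟩ := e
    intro r a
    simp only [pvBestLoop, pvMin]
    rcases hm : pvMin rest with _ | ⟨r'', a''⟩ <;>
      simp only [ih, hm] <;> split_ifs <;> dsimp only <;>
      (try split_ifs) <;> first | rfl | omega

-- the stage-advancing fact: if stage i fails, every rank is ≥ i+1
theorem pvRanks_succ (cc : List (String × List String)) (i : Nat)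
    (hlo : ∀ e ∈ cc, i ≤ pvRank e.1)
    (hn : pvFirst (fun fp => pvRank fp == i) cc = none) :
    ∀ e ∈ cc, i + 1 ≤ pvRank e.1 := by
  intro e he
  have := (pvFirst_eq_none _ cc).mp hn e he
  have := hlo e he
  simp at *
  omega

-- A's post-lookup chain equals the args of the first minimal-rank entry
theorem pvAfter_eq_min (cc : List (String × List String)) :
    (match pvScanSuffixes pvSuffixes cc with
     | some a => a
     | none =>
       match pvFirst (fun fp => PySem.Str.isIn "/mooncake-store/src/" fp) cc with
       | some a => a
       | none =>
         match pvFirst (fun _ => true) cc with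
         | some a => a
         | none => []) =
    (match pvMin cc with
     | none => []
     | some (_, a') => a') := by
  have h0 : ∀ e ∈ cc, (0:Nat) ≤ pvRank e.1 := fun _ _ => Nat.zero_le _
  -- stage 0
  have c0 : pvFirst (fun fp => PySem.Str.endswith fp "mooncake-store/src/serialize/serializer.cpp") cc
      = pvFirst (fun fp => pvRank fp == 0) cc := by
    apply pvFirst_congr; intro e _; rw [pvRank_eq]; split_ifs <;> simp_all
  simp only [pvScanSuffixes, pvSuffixes, c0]
  rcases h0f : pvFirst (fun fp => pvRank fp == 0) cc with _ | a0
  case some => exact (pvMin_of_first cc 0 h0 a0 h0f ▸ rfl)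
  have h1 := pvRanks_succ cc 0 h0 h0f
  have c1 : pvFirst (fun fp => PySem.Str.endswith fp "mooncake-store/src/master_service.cpp") cc
      = pvFirst (fun fp => pvRank fp == 1) cc := by
    apply pvFirst_congr; intro e he; have := h1 e he; rw [pvRank_eq] at *
    split_ifs at * <;> simp_all
  simp only [c1]
  rcases h1f : pvFirst (fun fp => pvRank fp == 1) cc with _ | a1
  case some => exact (pvMin_of_first cc 1 h1 a1 h1f ▸ rfl)
  have h2 := pvRanks_succ cc 1 h1 h1f
  have c2 : pvFirst (fun fp => PySem.Str.endswith fp "mooncake-store/src/segment.cpp") cc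
      = pvFirst (fun fp => pvRank fp == 2) cc := by
    apply pvFirst_congr; intro e he; have := h2 e he; rw [pvRank_eq] at *
    split_ifs at * <;> simp_all
  simp only [c2]
  rcases h2f : pvFirst (fun fp => pvRank fp == 2) cc with _ | a2
  case some => exact (pvMin_of_first cc 2 h2 a2 h2f ▸ rfl)
  have h3 := pvRanks_succ cc 2 h2 h2f
  have c3 : pvFirst (fun fp => PySem.Str.endswith fp "mooncake-store/src/task_manager.cpp") cc
      = pvFirst (fun fp => pvRank fp == 3) cc := by
    apply pvFirst_congr; intro e he; have := h3 e he; rw [pvRank_eq] at *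
    split_ifs at * <;> simp_all
  simp only [c3]
  rcases h3f : pvFirst (fun fp => pvRank fp == 3) cc with _ | a3
  case some => exact (pvMin_of_first cc 3 h3 a3 h3f ▸ rfl)
  have h4 := pvRanks_succ cc 3 h3 h3f
  have c4 : pvFirst (fun fp => PySem.Str.isIn "/mooncake-store/src/" fp) cc
      = pvFirst (fun fp => pvRank fp == 4) cc := by
    apply pvFirst_congr; intro e he; have := h4 e he; rw [pvRank_eq] at *
    split_ifs at * <;> simp_all
  simp only [c4]
  rcases h4f : pvFirst (fun fp => pvRank fp == 4) cc with _ | a4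
  case some => exact (pvMin_of_first cc 4 h4 a4 h4f ▸ rfl)
  have h5 := pvRanks_succ cc 4 h4 h4f
  have c5 : pvFirst (fun _ : String => true) cc = pvFirst (fun fp => pvRank fp == 5) cc := by
    apply pvFirst_congr; intro e he; have h := h5 e he; have h' := pvRank_le e.1
    have : pvRank e.1 = 5 := by omega
    simp [this]
  simp only [c5]
  rcases h5f : pvFirst (fun fp => pvRank fp == 5) cc with _ | a5
  case some => exact (pvMin_of_first cc 5 h5 a5 h5f ▸ rfl)
  -- every rank ≤ 5, and stages 0..5 all failed: cc is empty
  have h6 := pvRanks_succ cc 5 h5 h5f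
  rcases cc with _ | ⟨e, rest⟩
  · rfl
  · exact absurd (h6 e (by simp)) (by have := pvRank_le e.1; omega)

theorem pvMin_rank_le (cc : List (String × List String)) :
    ∀ r' a', pvMin cc = some (r', a') → r' ≤ 5 := by
  induction cc with
  | nil => simp [pvMin]
  | cons e rest ih =>
    obtain ⟨fp, args⟩ := e
    intro r' a' h
    simp only [pvMin] at h
    rcases hm : pvMin rest with _ | ⟨r'', a''⟩ <;> rw [hm] at h <;> dsimp only at h
    · simp at h; have := pvRank_le fp; omega
    · have := ih r'' a'' hm
      have := pvRank_le fp
      split_ifs at h <;> (simp at h; omega)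

-- ===== VERDICT (by name: the statement is the Claim_ definition above) =====
theorem select_compile_args_spec : Claim_equal_select_compile_args := by
  intro h cc _
  unfold Spec_select_compile_args select_compile_args select_compile_args_alt
  split_ifs
  · rfl
  · rw [pvAfter_eq_min cc, pvBestLoop_eq cc 6 []]
    rcases hm : pvMin cc with _ | ⟨r', a'⟩
    · rfl
    · have h5 := pvMin_rank_le cc r' a' hm
      have h6 : r' < 6 := by omega
      simp [h6]
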